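-- pv_equiv track=rewrite | github.com/SlamkovDejan/aoc-2023 | day_1/part_2.py | get_index_of_each_digit
-- ===== SOURCE A (Python) =====
-- possible_digits_map = {
--     '1': '1',
--     '2': '2',
--     '3': '3',
--     '4': '4',
--     '5': '5',
--     '6': '6',
--     '7': '7',
--     '8': '8',
--     '9': '9',
--     'one': '1',
--     'two': '2',
--     'three': '3',
--     'four': '4',
--     'five': '5',
--     'six': '6',
--     'seven': '7',
--     'eight': '8',
--     'nine': '9'
-- }
--
-- def get_index_of_each_digit(line: str) -> dict[str, list[int]]:
--     result: dict[str, list[int]] = {}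
--     for digit in possible_digits_map.keys():
--         first_index_of_digit = line.find(digit)
--         if first_index_of_digit == -1:
--             continue
--         indexes = [first_index_of_digit]
--         last_index_of_digit = line.rfind(digit, first_index_of_digit)
--         if first_index_of_digit != last_index_of_digit:
--             indexes.append(last_index_of_digit)
--         result[digit] = indexes
--     return result
-- ===== SOURCE B (Python) =====
-- possible_digits_map = {
--     '1': '1', '2': '2', '3': '3', '4': '4', '5': '5', '6': '6', '7': '7',
--     '8': '8', '9': '9',
--     'one': '1', 'two': '2', 'three': '3', 'four': '4', 'five': '5',
--     'six': '6', 'seven': '7', 'eight': '8', 'nine': '9'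
-- }
--
--
-- def get_index_of_each_digit(line: str) -> dict[str, list[int]]:
--     # One left-to-right pass over the positions of `line`: for every token,
--     # keep the (first, last) indices where it occurs.  Then assemble the
--     # result in key order of possible_digits_map.
--     span: dict[str, tuple[int, int]] = {}
--     for i in range(len(line)):
--         for t in possible_digits_map:
--             if line.startswith(t, i):
--                 f, _ = span.get(t, (i, i))
--                 span[t] = (f, i)
--     result: dict[str, list[int]] = {}
--     for t in possible_digits_map:
--         if t in span:
--             f, l = span[t]
--             result[t] = [f] if f == l else [f, l]
--     return result
-- ===== Notes on version B (the rewrite author's own statement) =====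
-- stated objective: alternative
-- what changed: Replaces the per-token find/rfind builtin calls by a single left-to-right scan over the positions of the line that maintains a (first,last) span per token, the result being assembled afterwards in key order.
import Mathlib
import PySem

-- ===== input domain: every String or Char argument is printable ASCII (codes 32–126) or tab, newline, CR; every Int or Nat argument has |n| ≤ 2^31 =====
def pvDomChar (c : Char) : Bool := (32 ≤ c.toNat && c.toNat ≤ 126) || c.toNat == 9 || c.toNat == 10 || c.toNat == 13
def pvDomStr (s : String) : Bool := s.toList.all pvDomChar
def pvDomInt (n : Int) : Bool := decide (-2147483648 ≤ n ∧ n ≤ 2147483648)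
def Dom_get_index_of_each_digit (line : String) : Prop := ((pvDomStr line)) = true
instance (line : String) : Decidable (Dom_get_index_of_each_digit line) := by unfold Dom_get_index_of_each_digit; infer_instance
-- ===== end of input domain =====

-- B replaces A's per-token find/rfind builtin calls by one left-to-right scan over the
-- positions of the line maintaining a (first,last) span per token (objective: alternative).

-- keys of the module constant possible_digits_map, in insertion order (shared context of A and B)
def pvDigitKeys : List String :=
  ["1", "2", "3", "4", "5", "6", "7", "8", "9",
   "one", "two", "three", "four", "five", "six", "seven", "eight", "nine"]

-- ===== PORT A =====
def get_index_of_each_digit (line : String) : List (String × List Int) :=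
  (pvDigitKeys.foldl (fun (result : PySem.Dict String (List Int)) digit =>
      let first_index_of_digit := PySem.Str.find line digit
      if first_index_of_digit = -1 then result
      else
        let indexes := [first_index_of_digit]
        let last_index_of_digit := PySem.Str.rfindFrom line digit first_index_of_digit
        let indexes := if first_index_of_digit ≠ last_index_of_digit
                       then indexes ++ [last_index_of_digit] else indexes
        result.insert digit indexes) PySem.Dict.empty).items

-- ===== PORT B =====
-- Python's line.startswith(t, i); exact for 0 ≤ i (the only use: i comes from range(len(line)))
def pvStartswithAt (line : String) (t : String) (i : Int) : Bool :=
  PySem.Chars.startswith (line.toList.drop i.toNat) t.toList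

-- body of B's inner loop: if line.startswith(t, i): f, _ = span.get(t, (i, i)); span[t] = (f, i)
def pvInnerStep (line : String) (i : Int) (sp : PySem.Dict String (Int × Int)) (t : String) :
    PySem.Dict String (Int × Int) :=
  if pvStartswithAt line t i then sp.insert t ((sp.getD t (i, i)).1, i) else sp

-- body of B's outer loop over i in range(len(line))
def pvOuterStep (line : String) (sp : PySem.Dict String (Int × Int)) (i : Int) :
    PySem.Dict String (Int × Int) :=
  pvDigitKeys.foldl (pvInnerStep line i) sp

def get_index_of_each_digit_alt (line : String) : List (String × List Int) :=
  let span := (PySem.List.pyRange 0 (PySem.Str.len line)).foldl (pvOuterStep line) PySem.Dict.empty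
  (pvDigitKeys.foldl (fun (result : PySem.Dict String (List Int)) t =>
      match span.get? t with
      | some (f, l) => result.insert t (if f = l then [f] else [f, l])
      | none => result) PySem.Dict.empty).items

-- ===== PRECONDITION & SPEC =====
def Spec_get_index_of_each_digit (line : String) (out : List (String × List Int)) : Prop := out = get_index_of_each_digit_alt line
instance (line : String) (out : List (String × List Int)) : Decidable (Spec_get_index_of_each_digit line out) := by unfold Spec_get_index_of_each_digit; infer_instance

-- ===== CLAIM (what is proved, stated in full; the proofs are below) =====
def Claim_equal_get_index_of_each_digit : Prop := ∀ (line : String), Dom_get_index_of_each_digit line → Spec_get_index_of_each_digit line (get_index_of_each_digit line)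

-- ===== LEMMAS AND PROOFS =====

-- Boolean "token t occurs in line at position i"
def pvP (line t : String) (i : Nat) : Bool :=
  PySem.Chars.startswith (line.toList.drop i) t.toList

-- all positions (in increasing order) at which t occurs in line's first n characters
def pvOcc (line t : String) (n : Nat) : List Nat := (List.range n).filter (pvP line t)

-- the (first, last) pair B's span dict holds for a token with this occurrence list
def pvSpanVal (occ : List Nat) : Option (Int × Int) :=
  occ.head?.bind fun f => occ.getLast?.map fun l => ((f : Int), (l : Int))

theorem pvKeys_nodup : pvDigitKeys.Nodup := by decide

theorem pvKeys_ne_nil : ∀ t ∈ pvDigitKeys, t.toList ≠ [] := by decide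



-- in a strictly increasing list the last element is maximal
theorem pvPairwise_getLast_max {l : List Nat} {m : Nat} (hl : l.Pairwise (· < ·))
    (h : l.getLast? = some m) : ∀ x ∈ l, x ≤ m := by
  induction l with
  | nil => simp
  | cons a tl ih =>
    cases tl with
    | nil => simp_all
    | cons b tl' =>
      intro x hx
      rw [List.getLast?_cons_cons] at h
      rcases List.mem_cons.mp hx with rfl | hx
      · have hm : m ∈ b :: tl' := List.mem_of_getLast? h
        exact le_of_lt ((List.pairwise_cons.mp hl).1 m hm)
      · exact ih (List.pairwise_cons.mp hl).2 h x hx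

-- in a strictly increasing list the head is minimal
theorem pvPairwise_head_min {l : List Nat} {m : Nat} (hl : l.Pairwise (· < ·))
    (h : l.head? = some m) : ∀ x ∈ l, m ≤ x := by
  cases l with
  | nil => simp
  | cons a tl =>
    simp at h; subst h
    intro x hx
    rcases List.mem_cons.mp hx with rfl | hx
    · exact le_refl _
    · exact le_of_lt ((List.pairwise_cons.mp hl).1 x hx)

-- rfind.go returns the greatest occurrence position ≤ k
theorem pvGo_eq (s sub : List Char) (m k : Nat) (hm : m ≤ k) (hp : sub <+: s.drop m)
    (hmax : ∀ i, m < i → i ≤ k → ¬ sub <+: s.drop i) :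
    PySem.Chars.rfind.go s sub k = (m : Int) := by
  induction k with
  | zero =>
    have hm0 : m = 0 := by omega
    subst hm0
    simp only [PySem.Chars.rfind.go]
    simp at hp
    simp [List.isPrefixOf_iff_prefix, hp]
  | succ j ih =>
    by_cases h : m = j + 1
    · subst h
      simp only [PySem.Chars.rfind.go]
      simp [List.isPrefixOf_iff_prefix, hp]
    · have hmj : m ≤ j := by omega
      have hnot : ¬ sub <+: s.drop (j + 1) := hmax (j + 1) (by omega) (by omega)
      simp only [PySem.Chars.rfind.go]
      simp [List.isPrefixOf_iff_prefix, hnot]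
      exact ih hmj (fun i h1 h2 => hmax i h1 (by omega))

-- a fold of pvInnerStep over tokens not containing t leaves key t alone
theorem pvInner_untouched (line : String) (i : Int) (ts : List String) (t : String)
    (ht : t ∉ ts) (d : PySem.Dict String (Int × Int)) :
    (ts.foldl (pvInnerStep line i) d).get? t = d.get? t := by
  induction ts generalizing d with
  | nil => rfl
  | cons u us ih =>
    simp only [List.mem_cons, not_or] at ht
    rw [List.foldl_cons, ih ht.2]
    unfold pvInnerStep
    split
    · exact PySem.Dict.get?_insert_of_ne _ _ ht.1
    · rfl

-- effect of one inner loop (over distinct tokens) on key t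
theorem pvInner_get (line : String) (i : Int) (ts : List String) (t : String)
    (hnd : ts.Nodup) (ht : t ∈ ts) (d : PySem.Dict String (Int × Int)) :
    (ts.foldl (pvInnerStep line i) d).get? t =
      if pvStartswithAt line t i then some ((d.getD t (i, i)).1, i) else d.get? t := by
  induction ts generalizing d with
  | nil => simp at ht
  | cons u us ih =>
    rw [List.foldl_cons]
    rcases List.mem_cons.mp ht with rfl | htu
    · have hnu : t ∉ us := (List.nodup_cons.mp hnd).1
      rw [pvInner_untouched line i us t hnu]
      unfold pvInnerStep
      split
      · rw [PySem.Dict.get?_insert_self]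
      · rfl
    · have hne : u ≠ t := by
        rintro rfl; exact (List.nodup_cons.mp hnd).1 htu
      have hget : (pvInnerStep line i d u).get? t = d.get? t := by
        unfold pvInnerStep
        split
        · exact PySem.Dict.get?_insert_of_ne _ _ (Ne.symm hne)
        · rfl
      have hgetD : (pvInnerStep line i d u).getD t (i, i) = d.getD t (i, i) := by
        unfold pvInnerStep
        split
        · exact PySem.Dict.getD_insert_of_ne _ _ _ (Ne.symm hne)
        · rfl
      rw [ih (List.nodup_cons.mp hnd).2 htu, hget, hgetD]

-- invariant of B's scan: after positions [0, k), span holds (first, last) occurrence of t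
theorem pvSpan_inv (line t : String) (ht : t ∈ pvDigitKeys) (k : Nat) :
    (((List.range k).map (fun j : Nat => (j : Int))).foldl (pvOuterStep line) PySem.Dict.empty).get? t
      = pvSpanVal (pvOcc line t k) := by
  induction k with
  | zero =>
    simp [pvOcc, pvSpanVal, PySem.Dict.get?_empty]
  | succ k ih =>
    simp only [List.range_succ, List.map_append, List.map_cons, List.map_nil,
      List.foldl_append, List.foldl_cons, List.foldl_nil]
    unfold pvOuterStep at ih ⊢
    rw [pvInner_get line (k : Int) pvDigitKeys t pvKeys_nodup ht]
    have hsw : pvStartswithAt line t (k : Int) = pvP line t k := by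
      simp [pvStartswithAt, pvP]
    have hocc : pvOcc line t (k + 1)
        = pvOcc line t k ++ (if pvP line t k then [k] else []) := by
      by_cases hpk : pvP line t k = true <;>
        simp [pvOcc, List.range_succ, List.filter_append, List.filter, hpk]
    rw [hsw, hocc]
    by_cases hpk : pvP line t k = true
    · simp only [hpk, if_true]
      have hgd : ∀ d : PySem.Dict String (Int × Int), d.getD t ((k : Int), (k : Int))
          = (d.get? t).getD ((k : Int), (k : Int)) := fun _ => rfl
      rw [hgd, ih]
      cases hK : pvOcc line t k with
      | nil => simp [pvSpanVal]
      | cons f rest =>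
        obtain ⟨L, hL⟩ :=
          Option.isSome_iff_exists.mp (List.getLast?_isSome.mpr (by simp : (f :: rest) ≠ []))
        have hcat : ((f :: rest) ++ [k]).getLast? = some (k : Nat) := List.getLast?_concat
        simp only [List.cons_append] at hcat
        simp [pvSpanVal, hL, hcat]
    · simp only [hpk, if_false, Bool.false_eq_true]
      simp [ih]

-- membership in the occurrence list, spelled out
theorem pvMem_occ (line t : String) (i : Nat) :
    i ∈ pvOcc line t line.toList.length ↔
      (i < line.toList.length ∧ t.toList <+: line.toList.drop i) := by
  simp [pvOcc, List.mem_filter, List.mem_range, pvP, PySem.Chars.startswith_iff]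

-- per-token: A's find/rfind entry equals B's span entry
theorem pvStep_eq (line t : String) (ht : t ∈ pvDigitKeys)
    (acc : PySem.Dict String (List Int)) :
    (let first := PySem.Str.find line t
     if first = -1 then acc
     else
       let indexes := [first]
       let last := PySem.Str.rfindFrom line t first
       let indexes := if first ≠ last then indexes ++ [last] else indexes
       acc.insert t indexes)
    = (match (((List.range line.toList.length).map (fun j : Nat => (j : Int))).foldl
          (pvOuterStep line) PySem.Dict.empty).get? t with
       | some (f, l) => acc.insert t (if f = l then [f] else [f, l])
       | none => acc) := by
  have hne := pvKeys_ne_nil t ht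
  have hspan := pvSpan_inv line t ht line.toList.length
  rw [hspan, PySem.Str.find_eq]
  cases hO : pvOcc line t line.toList.length with
  | nil =>
    have hfind : PySem.Chars.find line.toList t.toList = -1 := by
      rw [PySem.Chars.find_eq_neg_one_iff]
      intro hinf
      obtain ⟨j, hj⟩ := (PySem.Chars.exists_prefix_drop_iff_isIn t.toList line.toList).mpr
        ((PySem.Chars.isIn_iff_infix _ _).mpr hinf)
      have hjn : j < line.toList.length := by
        by_contra h
        rw [List.drop_eq_nil_of_le (by omega)] at hj
        exact hne (List.prefix_nil.mp hj)
      have : j ∈ pvOcc line t line.toList.length := (pvMem_occ line t j).mpr ⟨hjn, hj⟩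
      rw [hO] at this; simp at this
    simp [hfind, pvSpanVal]
  | cons f rest =>
    have hmemf : f ∈ pvOcc line t line.toList.length := by rw [hO]; simp
    obtain ⟨L, hL⟩ :=
      Option.isSome_iff_exists.mp (List.getLast?_isSome.mpr (by simp : (f :: rest) ≠ []))
    have hmemL : L ∈ pvOcc line t line.toList.length := by
      rw [hO]; exact List.mem_of_getLast? hL
    have hpairs : (pvOcc line t line.toList.length).Pairwise (· < ·) :=
      List.Pairwise.filter _ (List.pairwise_lt_range)
    have hfmin : ∀ x ∈ pvOcc line t line.toList.length, f ≤ x :=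
      pvPairwise_head_min hpairs (by rw [hO]; rfl)
    have hLmax : ∀ x ∈ pvOcc line t line.toList.length, x ≤ L :=
      pvPairwise_getLast_max hpairs (hO ▸ hL)
    obtain ⟨hfn, hfp⟩ := (pvMem_occ line t f).mp hmemf
    obtain ⟨hLn, hLp⟩ := (pvMem_occ line t L).mp hmemL
    have hfL : f ≤ L := hfmin L hmemL
    -- find = f
    have h0 : 0 ≤ PySem.Chars.find line.toList t.toList := by
      rw [PySem.Chars.find_nonneg_iff]
      exact (PySem.Chars.isIn_iff_infix _ _).mp
        ((PySem.Chars.exists_prefix_drop_iff_isIn t.toList line.toList).mp ⟨f, hfp⟩)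
    obtain ⟨hFp, hFmin⟩ := PySem.Chars.find_spec h0
    have hFlt : (PySem.Chars.find line.toList t.toList).toNat < line.toList.length := by
      by_contra h
      rw [List.drop_eq_nil_of_le (by omega)] at hFp
      exact hne (List.prefix_nil.mp hFp)
    have hFocc : (PySem.Chars.find line.toList t.toList).toNat ∈
        pvOcc line t line.toList.length := (pvMem_occ line t _).mpr ⟨hFlt, hFp⟩
    have hFf : (PySem.Chars.find line.toList t.toList).toNat = f := by
      have h1 := hfmin _ hFocc
      have h2 : ¬ (f < (PySem.Chars.find line.toList t.toList).toNat) := fun h => hFmin f h hfp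
      omega
    have hfind : PySem.Chars.find line.toList t.toList = (f : Int) := by omega
    -- rfind from f = L
    have hgo : PySem.Chars.rfind.go (line.toList.drop f) t.toList
        (line.toList.drop f).length = ((L - f : Nat) : Int) := by
      rw [List.length_drop]
      apply pvGo_eq
      · omega
      · rw [List.drop_drop]
        have h : f + (L - f) = L := by omega
        rw [h]; exact hLp
      · intro i h1 h2 hpref
        rw [List.drop_drop] at hpref
        by_cases hin : f + i < line.toList.length
        · have : f + i ∈ pvOcc line t line.toList.length :=
            (pvMem_occ line t _).mpr ⟨hin, hpref⟩
          have := hLmax _ this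
          omega
        · rw [List.drop_eq_nil_of_le (by omega)] at hpref
          exact hne (List.prefix_nil.mp hpref)
    have hrf : PySem.Str.rfindFrom line t ((f : Nat) : Int) none = (L : Int) := by
      rw [PySem.Str.rfindFrom_eq]
      have hfnn : ¬ (((f : Nat) : Int) < 0) := by omega
      have hnf : ¬ ((line.toList.length : Int) < ((f : Nat) : Int)) := by
        omega
      simp only [PySem.Chars.rfindFrom, hfnn, hnf, if_false, Int.toNat_natCast,
        List.take_length]
      unfold PySem.Chars.rfind
      rw [hgo]
      rw [if_neg (by omega : ¬ (((L - f : Nat) : Int) = -1))]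
      omega
    rw [hfind]
    have hval : pvSpanVal (f :: rest) = some ((f : Int), (L : Int)) := by
      simp [pvSpanVal, hL]
    rw [hval]
    rw [if_neg (by omega : ¬ ((f : Int) = -1))]
    rw [hrf]
    by_cases hfl : f = L
    · subst hfl; simp
    · have hne2 : ((f : Int) ≠ (L : Int)) := by
        intro h; exact hfl (by omega)
      simp [hne2]

-- ===== VERDICT (by name: the statement is the Claim_ definition above) =====
theorem get_index_of_each_digit_spec : Claim_equal_get_index_of_each_digit := by
  intro line _
  unfold Spec_get_index_of_each_digit get_index_of_each_digit get_index_of_each_digit_alt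
  rw [PySem.Str.len_eq, PySem.List.pyRange_zero_natCast]
  congr 1
  apply PySem.List.foldl_congr_mem
  intro acc t ht
  exact pvStep_eq line t ht acc
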